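/- GENERATED by mk_final_copies.py from the proof of the farm's unit `inverse_mdct.6` (farm:inverse_mdct.6.1: Lemmas.lean) as the
   re-elaboration sweep compiled it — do not edit. -/
/-
  Unit inverse_mdct.6 (the first `l` loop of step 3, lines 2777-2782): the pure part.
    * the bit-level forms of the walk (`lea ecx, [r15 + d] ; sar / shl r32, cl`, `imul`, `neg`) as numbers;
    * `Fixed`: the 23 frame slots that no instruction of the segment writes, as facts about a MEMORY, with their frame rule
      (`Fixed.eqOn`): the segment stores to `d[rbp-58H]` and `d[rbp-80H]` only, its callee below the steady rsp and into `u`;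
    * `seg6_carry`: `Body` and `Fixed` from one cut of the segment to the next, over one finer `SameExcept`;
    * `Outer`, `Inner`: the invariants of the two loops (heads `loop5`, `loop4`).
-/
import Asan.CheckWalk
import Vorbis.Spec.MdctUse

open X86 X86.User Asan Vorbis Vorbis.Spec

set_option maxRecDepth 4000
set_option maxHeartbeats 4000000

namespace Vorbis.Spec.inverse_mdct_6
open Vorbis.Spec.inverse_mdct

/-! ### The bit-level forms of the walk, as numbers -/

/-- The shift count of `lea ecx, [r15 + d] ; sar/shl r32, cl` for `r15d = l`: `l + d`, when that is below 32. -/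
theorem count_eq (l : Nat) (d : Word) (dn : Nat) (hd : d.toNat = dn) (h : l + dn < 32) :
    (BitVec.setWidth 8 (BitVec.setWidth 32 (Word.ofBV (BitVec.ofNat 32 l) + d).toBitVec)).toNat % 32 = l + dn := by
  rw [BitVec.toNat_setWidth, BitVec.toNat_setWidth, UInt64.toNat_toBitVec, UInt64.toNat_add, toNat_ofBV32,
    BitVec.toNat_ofNat, hd]
  omega

/-- `sar r32, s` of a non-negative `int` given as a number: the division by `2 ^ s`. -/
theorem sar_ofNat (a s : Nat) (h : a < 2 ^ 31) :
    (BitVec.ofNat 32 a).sshiftRight s = BitVec.ofNat 32 (a >>> s) := by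
  apply BitVec.eq_of_toNat_eq
  have ha : (BitVec.ofNat 32 a).toNat = a := toNat_ofNat32 a (by omega)
  have hm : (BitVec.ofNat 32 a).msb = false := by
    rw [BitVec.msb_eq_decide, ha]
    simp only [decide_eq_false_iff_not, Nat.not_le]
    omega
  have hle : a >>> s ≤ a := by
    rw [Nat.shiftRight_eq_div_pow]
    exact Nat.div_le_self _ _
  rw [BitVec.toNat_sshiftRight_of_msb_false hm, ha, toNat_ofNat32 _ (by omega)]

/-- `shl r32, s` of 1: the power of two, for a count below 32. -/
theorem shl_one (s : Nat) (h : s < 32) : (1#32 <<< s) = BitVec.ofNat 32 (1 <<< s) := by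
  apply BitVec.eq_of_toNat_eq
  have hp : 2 ^ s < 2 ^ 32 := Nat.pow_lt_pow_right (by decide) h
  rw [BitVec.toNat_shiftLeft, Nat.shiftLeft_eq, Nat.shiftLeft_eq, BitVec.toNat_ofNat]
  rfl

/-- `sub edx, edi` after `imul edi, r13d`: `a − b i` in 32 bits, when nothing wraps. -/
theorem sub_mul_toNat (a i b : Nat) (h1 : b * i ≤ a) (h2 : a < 2 ^ 32) :
    (BitVec.ofNat 32 a - BitVec.ofNat 32 i * BitVec.ofNat 32 b).toNat = a - b * i := by
  have hc : i * b = b * i := Nat.mul_comm _ _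
  have hm : (BitVec.ofNat 32 i * BitVec.ofNat 32 b).toNat = b * i := by
    rw [BitVec.toNat_mul, BitVec.toNat_ofNat, BitVec.toNat_ofNat, ← Nat.mul_mod, hc]
    exact Nat.mod_eq_of_lt (by omega)
  rw [BitVec.toNat_sub, hm, toNat_ofNat32 a h2]
  omega

/-- `neg eax` of a positive `int`: the two's complement. -/
theorem neg_toNat (b : Nat) (h1 : 1 ≤ b) (h2 : b < 2 ^ 32) : (-BitVec.ofNat 32 b).toNat = 2 ^ 32 - b := by
  rw [BitVec.toNat_neg, toNat_ofNat32 b h2]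
  omega

/-- A signed 32-bit comparison of two small numbers is the comparison of the numbers. -/
theorem toInt_ofNat (a : Nat) (h : a < 2 ^ 31) : (BitVec.ofNat 32 a).toInt = (a : Int) := by
  have ha : (BitVec.ofNat 32 a).toNat = a := toNat_ofNat32 a (by omega)
  rw [toInt_of_lt _ (by omega), ha]

/-- A register whose value is a small number, as the equation the walker rewrites with. -/
theorem reg_eq_of_toNat (w : Word) (a : Nat) (h : w.toNat = a) (ha : a < 2 ^ 32) : w = Word.ofBV (BitVec.ofNat 32 a) := by
  apply UInt64.toNat_inj.mp
  rw [toNat_ofBV32, toNat_ofNat32 a ha, h]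


/-! ### The slots no instruction of the segment writes -/

/-- **The frame slots that stay fixed throughout segment 6**, as facts about a memory `m` (`ue` the entry state of
inverse_mdct): the eleven slots of `Body`, `SlotsBuf`, `SlotsA`, `SlotsS2`, `SlotsStep3` and `d[rbp-48H] = n >> 5`. NOT among them:
`d[rbp-80H]` (`n4`, overwritten by `n >> 5` on the exit path) and `d[rbp-58H]` (`l + 1`, written in every round). -/
structure Fixed (k : Nat) (A : Arena) (ue : State) (ret : Word) (m : Mem) : Prop where
  /-- the return address -/
  retSlot : UInt64.ofNat (m.readLE (ue.reg .rsp) 8) = ret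
  /-- `[rbp]`: the caller's rbp -/
  rbpSlot : UInt64.ofNat (m.readLE (ue.reg .rsp - 8) 8) = ue.reg .rbp
  /-- `[rbp − 8]`: the saved r15 -/
  r15Slot : UInt64.ofNat (m.readLE (ue.reg .rsp - 16) 8) = ue.reg .r15
  /-- `[rbp − 10H]`: the saved r14 -/
  r14Slot : UInt64.ofNat (m.readLE (ue.reg .rsp - 24) 8) = ue.reg .r14
  /-- `[rbp − 18H]`: the saved r13 -/
  r13Slot : UInt64.ofNat (m.readLE (ue.reg .rsp - 32) 8) = ue.reg .r13
  /-- `[rbp − 20H]`: the saved r12 -/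
  r12Slot : UInt64.ofNat (m.readLE (ue.reg .rsp - 40) 8) = ue.reg .r12
  /-- `[rbp − 28H]`: the saved rbx -/
  rbxSlot : UInt64.ofNat (m.readLE (ue.reg .rsp - 48) 8) = ue.reg .rbx
  /-- `q[rbp − 38H] = u` -/
  uSlot : UInt64.ofNat (m.readLE (ue.reg .rsp - 64) 8) = ue.reg .rdi
  /-- `q[rbp − 40H] = A` -/
  aSlot : m.readLE (ue.reg .rsp - 72) 8 = tabA ue
  /-- `d[rbp − 44H] = n` -/
  nSlot : m.readLE (ue.reg .rsp - 76) 4 = n ue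
  /-- `d[rbp − 48H] = n >> 5` -/
  n32Slot : m.readLE (ue.reg .rsp - 80) 4 = n ue / 32
  /-- `d[rbp − 50H] = n2 − 1` -/
  n2m1Slot : m.readLE (ue.reg .rsp - 88) 4 = n ue / 2 - 1
  /-- `d[rbp − 60H] = ld + 1` -/
  ilogSlot : m.readLE (ue.reg .rsp - 104) 4 = k + 1
  /-- `q[rbp − 68H] = v` -/
  vSlot : m.readLE (ue.reg .rsp - 112) 8 = tmp A ue
  /-- `d[rbp − 70H] = n2` -/
  n2Slot : m.readLE (ue.reg .rsp - 120) 4 = n ue / 2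
  /-- `q[rbp − 78H] = f` -/
  fSlot : UInt64.ofNat (m.readLE (ue.reg .rsp - 128) 8) = ue.reg .rdx
  /-- `d[rbp − 7CH] = bt` -/
  btSlot : m.readLE (ue.reg .rsp - 132) 4 = bt ue
  /-- `q[rbp − 88H] = 4·n2` -/
  n2x4Slot : m.readLE (ue.reg .rsp - 144) 8 = 4 * (n ue / 2)
  /-- `d[rbp − 8CH] = n8` -/
  n8Slot : m.readLE (ue.reg .rsp - 148) 4 = n ue / 8
  /-- `d[rbp − 90H] = save_point` -/
  saveSlot : m.readLE (ue.reg .rsp - 152) 4 = A.T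
  /-- `q[rbp − 98H] = 4·n2 − 32` -/
  n2x4m32Slot : m.readLE (ue.reg .rsp - 160) 8 = 4 * (n ue / 2) - 32
  /-- `q[rbp − A0H] = 4·n4` -/
  n4x4Slot : m.readLE (ue.reg .rsp - 168) 8 = 4 * (n ue / 4)
  /-- `q[rbp − A8H] = &u[n2]` -/
  uMidSlot : m.readLE (ue.reg .rsp - 176) 8 = buf ue + 4 * (n ue / 2)

/-- The fixed slots at the entry of the segment, from the assertion `At6`. -/
theorem Fixed.of_at6 {u₀ : State} {others : List Obj} {frames : List (Nat × FrameLayout)} {len : Nat} {A : Arena}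
    {stored room : Int} {ysz : Nat → Nat} {k c : Nat} {ue : State} {ret : Word} {v : State}
    (hat : At6 u₀ others frames len A stored room ysz k c ue ret v) : Fixed k A ue ret v.mem :=
  { retSlot := hat.body.retSlot
    rbpSlot := hat.body.rbpSlot
    r15Slot := hat.body.r15Slot
    r14Slot := hat.body.r14Slot
    r13Slot := hat.body.r13Slot
    r12Slot := hat.body.r12Slot
    rbxSlot := hat.body.rbxSlot
    uSlot := hat.sBuf.uSlot
    aSlot := hat.sA.aSlot
    nSlot := hat.sBuf.nSlot
    n32Slot := hat.n32Slot
    n2m1Slot := hat.s3.n2m1Slot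
    ilogSlot := hat.s3.ilogSlot
    vSlot := hat.body.vSlot
    n2Slot := hat.sA.n2Slot
    fSlot := hat.body.fSlot
    btSlot := hat.body.btSlot
    n2x4Slot := hat.sA.n2x4Slot
    n8Slot := hat.sA.n8Slot
    saveSlot := hat.body.saveSlot
    n2x4m32Slot := hat.sS2.n2x4m32Slot
    n4x4Slot := hat.sS2.n4x4Slot
    uMidSlot := hat.sBuf.uMidSlot }

/-- **The frame rule of the fixed slots**: a memory that agrees with `m` on the three parts of the frame around the two written
slots `d[rbp-80H]` (`ue.rsp − 136`) and `d[rbp-58H]` (`ue.rsp − 96`) has the same fixed slots. -/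
theorem Fixed.eqOn {k : Nat} {A : Arena} {ue : State} {ret : Word} {m m' : Mem} (hf : Fixed k A ue ret m)
    (hroom : 0x700000 + 368 ≤ (ue.reg .rsp).toNat) (htop : (ue.reg .rsp).toNat + 8 ≤ 0x800000)
    (e1 : Mem.EqOn ((ue.reg .rsp).toNat - 184) ((ue.reg .rsp).toNat - 136) m m')
    (e2 : Mem.EqOn ((ue.reg .rsp).toNat - 132) ((ue.reg .rsp).toNat - 96) m m')
    (e3 : Mem.EqOn ((ue.reg .rsp).toNat - 92) ((ue.reg .rsp).toNat + 8) m m') : Fixed k A ue ret m' := by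
  refine ⟨?_, ?_, ?_, ?_, ?_, ?_, ?_, ?_, ?_, ?_, ?_, ?_, ?_, ?_, ?_, ?_, ?_, ?_, ?_, ?_, ?_, ?_, ?_⟩
  · rw [e3.readLE (ue.reg .rsp) 8 (by u_omega) (by u_omega) (by u_omega)]
    exact hf.retSlot
  · rw [e3.readLE (ue.reg .rsp - 8) 8 (by u_omega) (by u_omega) (by u_omega)]
    exact hf.rbpSlot
  · rw [e3.readLE (ue.reg .rsp - 16) 8 (by u_omega) (by u_omega) (by u_omega)]
    exact hf.r15Slot
  · rw [e3.readLE (ue.reg .rsp - 24) 8 (by u_omega) (by u_omega) (by u_omega)]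
    exact hf.r14Slot
  · rw [e3.readLE (ue.reg .rsp - 32) 8 (by u_omega) (by u_omega) (by u_omega)]
    exact hf.r13Slot
  · rw [e3.readLE (ue.reg .rsp - 40) 8 (by u_omega) (by u_omega) (by u_omega)]
    exact hf.r12Slot
  · rw [e3.readLE (ue.reg .rsp - 48) 8 (by u_omega) (by u_omega) (by u_omega)]
    exact hf.rbxSlot
  · rw [e3.readLE (ue.reg .rsp - 64) 8 (by u_omega) (by u_omega) (by u_omega)]
    exact hf.uSlot
  · rw [e3.readLE (ue.reg .rsp - 72) 8 (by u_omega) (by u_omega) (by u_omega)]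
    exact hf.aSlot
  · rw [e3.readLE (ue.reg .rsp - 76) 4 (by u_omega) (by u_omega) (by u_omega)]
    exact hf.nSlot
  · rw [e3.readLE (ue.reg .rsp - 80) 4 (by u_omega) (by u_omega) (by u_omega)]
    exact hf.n32Slot
  · rw [e3.readLE (ue.reg .rsp - 88) 4 (by u_omega) (by u_omega) (by u_omega)]
    exact hf.n2m1Slot
  · rw [e2.readLE (ue.reg .rsp - 104) 4 (by u_omega) (by u_omega) (by u_omega)]
    exact hf.ilogSlot
  · rw [e2.readLE (ue.reg .rsp - 112) 8 (by u_omega) (by u_omega) (by u_omega)]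
    exact hf.vSlot
  · rw [e2.readLE (ue.reg .rsp - 120) 4 (by u_omega) (by u_omega) (by u_omega)]
    exact hf.n2Slot
  · rw [e2.readLE (ue.reg .rsp - 128) 8 (by u_omega) (by u_omega) (by u_omega)]
    exact hf.fSlot
  · rw [e2.readLE (ue.reg .rsp - 132) 4 (by u_omega) (by u_omega) (by u_omega)]
    exact hf.btSlot
  · rw [e1.readLE (ue.reg .rsp - 144) 8 (by u_omega) (by u_omega) (by u_omega)]
    exact hf.n2x4Slot
  · rw [e1.readLE (ue.reg .rsp - 148) 4 (by u_omega) (by u_omega) (by u_omega)]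
    exact hf.n8Slot
  · rw [e1.readLE (ue.reg .rsp - 152) 4 (by u_omega) (by u_omega) (by u_omega)]
    exact hf.saveSlot
  · rw [e1.readLE (ue.reg .rsp - 160) 8 (by u_omega) (by u_omega) (by u_omega)]
    exact hf.n2x4m32Slot
  · rw [e1.readLE (ue.reg .rsp - 168) 8 (by u_omega) (by u_omega) (by u_omega)]
    exact hf.n4x4Slot
  · rw [e1.readLE (ue.reg .rsp - 176) 8 (by u_omega) (by u_omega) (by u_omega)]
    exact hf.uMidSlot

/-! ### From one cut of the segment to the next -/

/-- **The frame rule of segment 6**: `Body` and the fixed slots at `w` from those at `v`, when between the two only the stack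
below the steady rsp (the callee's frame and return address), the two slots `d[rbp-80H]`, `d[rbp-58H]` and floats of
`u[0 .. n2)` were written (`hk`: by `u_same` from the walker's `w_mem` and the callee's footprint). -/
theorem seg6_carry {u₀ : State} {others : List Obj} {frames : List (Nat × FrameLayout)} {len : Nat} {A : Arena}
    {stored room : Int} {ysz : Nat → Nat} {k c : Nat} {ue : State} {ret : Word} {v w : State}
    (hb : Body u₀ others frames len A stored room ysz k c ue ret v) (hf : Fixed k A ue ret v.mem)
    (hk : Mem.SameExcept
      [⟨(ue.reg .rsp).toNat - 368, (ue.reg .rsp).toNat - 184⟩,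
       ⟨(ue.reg .rsp).toNat - 136, (ue.reg .rsp).toNat - 132⟩,
       ⟨(ue.reg .rsp).toNat - 96, (ue.reg .rsp).toNat - 92⟩,
       ⟨buf ue, buf ue + 4 * (n ue / 2)⟩] v.mem w.mem)
    (hcode : CodeOK u₀ w.mem) (habi : abiInv w)
    (hrbp : w.reg .rbp = ue.reg .rsp - 8) (hrsp : w.reg .rsp = ue.reg .rsp - 184) :
    Body u₀ others frames len A stored room ysz k c ue ret w ∧ Fixed k A ue ret w.mem := by
  have hp := hb.pre
  have hroom := hb.entry.room
  have htop := hb.entry.top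
  simp only [vspec, conv_stackLo, conv_stackHi] at hroom htop
  have hnle := hp.n_le
  have hoS := hp.offStack _ hp.buf_blk
  simp only [] at hoS
  -- the three parts of the frame around the two written slots are untouched
  have e1 : Mem.EqOn ((ue.reg .rsp).toNat - 184) ((ue.reg .rsp).toNat - 136) v.mem w.mem := by
    apply hk.eqOn
    intro x hx
    simp only [List.mem_cons, List.mem_nil_iff, or_false] at hx
    rcases hx with rfl | rfl | rfl | rfl <;> simp only [] <;> omega
  have e2 : Mem.EqOn ((ue.reg .rsp).toNat - 132) ((ue.reg .rsp).toNat - 96) v.mem w.mem := by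
    apply hk.eqOn
    intro x hx
    simp only [List.mem_cons, List.mem_nil_iff, or_false] at hx
    rcases hx with rfl | rfl | rfl | rfl <;> simp only [] <;> omega
  have e3 : Mem.EqOn ((ue.reg .rsp).toNat - 92) ((ue.reg .rsp).toNat + 8) v.mem w.mem := by
    apply hk.eqOn
    intro x hx
    simp only [List.mem_cons, List.mem_nil_iff, or_false] at hx
    rcases hx with rfl | rfl | rfl | rfl <;> simp only [] <;> omega
  have hf' : Fixed k A ue ret w.mem := hf.eqOn hroom htop e1 e2 e3
  -- the coarser footprint `Body.carry` asks for
  have hs : Mem.SameExcept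
      [⟨(ue.reg .rsp).toNat - 368, (ue.reg .rsp).toNat⟩, ⟨buf ue, buf ue + 4 * n ue⟩, ⟨tmp A ue, tmp A ue + 2 * n ue⟩]
      v.mem w.mem := by
    apply hk.mono
    intro x hx a ha1 ha2
    simp only [List.mem_cons, List.mem_nil_iff, or_false] at hx
    rcases hx with rfl | rfl | rfl | rfl
    · refine ⟨_, List.mem_cons_self, ?_, ?_⟩
      · exact ha1
      · have h2 : a < (ue.reg .rsp).toNat - 184 := ha2
        show a < (ue.reg .rsp).toNat
        omega
    · refine ⟨_, List.mem_cons_self, ?_, ?_⟩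
      · have h1 : (ue.reg .rsp).toNat - 136 ≤ a := ha1
        show (ue.reg .rsp).toNat - 368 ≤ a
        omega
      · have h2 : a < (ue.reg .rsp).toNat - 132 := ha2
        show a < (ue.reg .rsp).toNat
        omega
    · refine ⟨_, List.mem_cons_self, ?_, ?_⟩
      · have h1 : (ue.reg .rsp).toNat - 96 ≤ a := ha1
        show (ue.reg .rsp).toNat - 368 ≤ a
        omega
      · have h2 : a < (ue.reg .rsp).toNat - 92 := ha2
        show a < (ue.reg .rsp).toNat
        omega
    · refine ⟨_, List.mem_cons_of_mem _ List.mem_cons_self, ?_, ?_⟩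
      · exact ha1
      · have h2 : a < buf ue + 4 * (n ue / 2) := ha2
        show a < buf ue + 4 * n ue
        omega
  exact ⟨hb.carry hs hcode habi hrbp hrsp hf'.retSlot hf'.rbpSlot hf'.r15Slot hf'.r14Slot hf'.r13Slot hf'.r12Slot
    hf'.rbxSlot hf'.fSlot hf'.btSlot hf'.saveSlot hf'.vSlot, hf'⟩

/-! ### The invariants of the two loops -/

/-- **At the head of the first `l` loop** (`loop5`, 0x10986b, line 2777 `for (; l < (ld-3)>>1; ++l)`) with the ghost `l`:
`r15d = l`, `2 ≤ l ≤ lmid k`; the shared part of the cut-point assertions and the fixed slots. (`d[rbp-80H]` still holds `n4`: it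
is not read in the segment, and overwritten on the exit path.) -/
structure Outer (u₀ : State) (others : List Obj) (frames : List (Nat × FrameLayout)) (len : Nat) (A : Arena)
    (stored room : Int) (ysz : Nat → Nat) (k c : Nat) (ue : State) (ret : Word) (l : Nat) (v : State) : Prop where
  /-- at the head of the outer loop -/
  rip : v.rip = L.inverse_mdct.loop5
  /-- the shared part of every cut-point assertion of inverse_mdct -/
  body : Body u₀ others frames len A stored room ysz k c ue ret v
  /-- the slots the segment does not write -/
  fixed : Fixed k A ue ret v.mem
  /-- `r15d = l` (the upper half of r15 is 0) -/
  r15 : v.reg .r15 = Word.ofBV (BitVec.ofNat 32 l)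
  /-- `l` starts at 2 -/
  lo : 2 ≤ l
  /-- … and stops at `lmid k = max(2, (ld − 3) >> 1)` -/
  hi : l ≤ Mdct.lmid k

/-- **At the head of the inner `i` loop** (`loop4`, 0x109860, line 2781 `for (i=0; i < lim; ++i)`) with the ghosts `l`, `i`:
the guard of the outer loop holds at `l`; `ebx = i ≤ lim = r12d = 2^(l+1)`, `r13d = k0 = n >> (l+2)`, `r14d = k0_2 = k0 >> 1`,
`r15d = l`, `d[rbp-58H] = l + 1`. -/
structure Inner (u₀ : State) (others : List Obj) (frames : List (Nat × FrameLayout)) (len : Nat) (A : Arena)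
    (stored room : Int) (ysz : Nat → Nat) (k c : Nat) (ue : State) (ret : Word) (l i : Nat) (v : State) : Prop where
  /-- at the head of the inner loop -/
  rip : v.rip = L.inverse_mdct.loop4
  /-- the shared part of every cut-point assertion of inverse_mdct -/
  body : Body u₀ others frames len A stored room ysz k c ue ret v
  /-- the slots the segment does not write -/
  fixed : Fixed k A ue ret v.mem
  /-- the guard of the outer loop: `2 ≤ l < (ld − 3) >> 1` -/
  guard : Mdct.InFirst k l
  /-- `i ≤ lim` -/
  ile : i ≤ Mdct.lim l
  /-- `d[rbp − 58H] = l + 1` -/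
  l1Slot : v.mem.readLE (ue.reg .rsp - 96) 4 = l + 1
  /-- `r15d = l` -/
  r15 : v.reg .r15 = Word.ofBV (BitVec.ofNat 32 l)
  /-- `ebx = i` -/
  rbx : v.reg .rbx = Word.ofBV (BitVec.ofNat 32 i)
  /-- `r12d = lim = 1 << (l + 1)` -/
  r12 : v.reg .r12 = Word.ofBV (BitVec.ofNat 32 (Mdct.lim l))
  /-- `r13d = k0 = n >> (l + 2)` -/
  r13 : v.reg .r13 = Word.ofBV (BitVec.ofNat 32 (Mdct.k0 (n ue) l))
  /-- `r14d = k0_2 = k0 >> 1` -/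
  r14 : v.reg .r14 = Word.ofBV (BitVec.ofNat 32 (Mdct.k02 (n ue) l))

end Vorbis.Spec.inverse_mdct_6
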